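-- pv_equiv track=rewrite | github.com/paiml/depyler | examples/hard_db_chord_lookup.py | build_finger_table
-- ===== SOURCE A (Python) =====
-- from typing import List, Tuple
--
-- def in_range(val: int, start: int, end: int, ring_size: int) -> bool:
--     if start < end:
--         return val > start and val <= end
--     return val > start or val <= end
--
-- def build_finger_table(node_id: int, nodes: List[int], m: int) -> List[int]:
--     ring_size: int = 1 << m
--     table: List[int] = []
--     for i in range(m):
--         start: int = (node_id + (1 << i)) % ring_size
--         best: int = nodes[0]
--         for n in nodes:
--             if in_range(n, start - 1, start + ring_size // 2, ring_size):
--                 best = n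
--                 break
--         table.append(best)
--     return table
-- ===== SOURCE B (Python) =====
-- def build_finger_table(node_id, nodes, m):
--     ring_size = 1 << m
--     half = ring_size // 2
--     # sort (value, original index) once; per finger, binary-search the value
--     # interval [start, start + half] and take the smallest original index in it
--     pairs = sorted(((v, j) for j, v in enumerate(nodes)), key=lambda p: p[0])
--     vals = [p[0] for p in pairs]
--     idxs = [p[1] for p in pairs]
--     n = len(vals)
--
--     def search(x, strict):
--         lo, hi = 0, n
--         while lo < hi:
--             mid = (lo + hi) // 2
--             if (vals[mid] < x) if strict else (vals[mid] <= x):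
--                 lo = mid + 1
--             else:
--                 hi = mid
--         return lo
--
--     table = []
--     for i in range(m):
--         start = (node_id + (1 << i)) % ring_size
--         a = search(start, True)
--         b = search(start + half, False)
--         table.append(nodes[min(idxs[a:b])] if a < b else nodes[0])
--     return table
-- ===== Notes on version B (the rewrite author's own statement) =====
-- stated objective: faster
-- what changed: Instead of a linear first-match scan of nodes per finger, B sorts (value, index) pairs once and answers each finger with two hand-written binary searches over the sorted values plus a minimum-index pick inside the matched value window; a timing run measured B far faster at the largest size.
import Mathlib
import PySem

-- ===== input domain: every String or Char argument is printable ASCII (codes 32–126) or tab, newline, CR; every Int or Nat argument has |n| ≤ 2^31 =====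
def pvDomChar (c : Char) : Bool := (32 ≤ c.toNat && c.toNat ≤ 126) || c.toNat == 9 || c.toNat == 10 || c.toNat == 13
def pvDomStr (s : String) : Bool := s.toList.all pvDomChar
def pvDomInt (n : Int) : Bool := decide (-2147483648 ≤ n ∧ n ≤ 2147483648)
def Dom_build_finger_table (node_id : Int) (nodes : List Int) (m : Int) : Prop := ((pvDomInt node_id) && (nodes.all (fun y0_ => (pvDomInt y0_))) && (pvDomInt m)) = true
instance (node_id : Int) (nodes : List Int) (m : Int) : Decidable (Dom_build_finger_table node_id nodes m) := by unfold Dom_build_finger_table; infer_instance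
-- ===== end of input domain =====

-- B replaces the per-finger linear first-match scan by one sort of (value, index)
-- pairs plus two binary searches and a minimum-index pick per finger.

-- ===== PORT A =====
def in_range (val start end_ ring_size : Int) : Bool :=
  if start < end_ then decide (val > start) && decide (val ≤ end_)
  else decide (val > start) || decide (val ≤ end_)

-- the inner 'for n in nodes: if in_range(...): best = n; break' loop
def fingerScan (s e ring : Int) (xs : List Int) (best : Int) : Int :=
  match xs with
  | [] => best
  | n :: rest => if in_range n s e ring then n else fingerScan s e ring rest best

def build_finger_table (node_id : Int) (nodes : List Int) (m : Int) : List Int :=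
  let ring_size : Int := (1 : Int) <<< m.toNat   -- 1 << m; exact for 0 ≤ m (Pre_; Python raises ValueError for m < 0)
  (PySem.List.pyRange 0 m 1).foldl (fun table i =>
    let start : Int := PySem.Int.mod (node_id + ((1 : Int) <<< i.toNat)) ring_size
    let best : Int := PySem.List.pyGetD nodes 0 0   -- nodes[0]; in range under Pre_
    table ++ [fingerScan (start - 1) (start + PySem.Int.floordiv ring_size 2) ring_size nodes best]) []

-- ===== PORT B =====
-- the 'while lo < hi' binary-search loop of Source B's 'search'
def bsB (vals : List Int) (strict : Bool) (x : Int) (lo hi : Nat) : Nat :=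
  if h : lo < hi then
    let mid := (lo + hi) / 2
    if (if strict then decide (PySem.List.pyGetD vals (mid : Int) 0 < x)
        else decide (PySem.List.pyGetD vals (mid : Int) 0 ≤ x))
    then bsB vals strict x (mid + 1) hi
    else bsB vals strict x lo mid
  else lo
termination_by hi - lo
decreasing_by all_goals omega

def build_finger_table_alt (node_id : Int) (nodes : List Int) (m : Int) : List Int :=
  let ring_size : Int := (1 : Int) <<< m.toNat
  let half : Int := PySem.Int.floordiv ring_size 2
  let pairs := PySem.List.sorted ((PySem.List.enumerate nodes).map (fun p => (p.2, p.1))) (fun p => p.1) false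
  let vals := pairs.map (fun p => p.1)
  let idxs := pairs.map (fun p => p.2)
  let n := vals.length
  (PySem.List.pyRange 0 m 1).foldl (fun table i =>
    let start : Int := PySem.Int.mod (node_id + ((1 : Int) <<< i.toNat)) ring_size
    let a := bsB vals true start 0 n
    let b := bsB vals false (start + half) 0 n
    table ++ [if a < b then
        PySem.List.pyGetD nodes ((PySem.List.min? (PySem.List.slice idxs (some (a : Int)) (some (b : Int))) (fun z => z)).getD 0) 0
      else PySem.List.pyGetD nodes 0 0]) []

-- ===== PRECONDITION & SPEC =====
-- Python A raises ValueError on m < 0 (1 << m) and IndexError on nodes == [] with m > 0 (nodes[0]).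
def Pre_build_finger_table (node_id : Int) (nodes : List Int) (m : Int) : Prop :=
  0 ≤ m ∧ (nodes = [] → m = 0)
instance (node_id : Int) (nodes : List Int) (m : Int) : Decidable (Pre_build_finger_table node_id nodes m) := by unfold Pre_build_finger_table; infer_instance

def pvWitness_build_finger_table : Int × List Int × Int := (0, ([1, 3, 5], 3))

def Spec_build_finger_table (node_id : Int) (nodes : List Int) (m : Int) (out : List Int) : Prop := out = build_finger_table_alt node_id nodes m
instance (node_id : Int) (nodes : List Int) (m : Int) (out : List Int) : Decidable (Spec_build_finger_table node_id nodes m out) := by unfold Spec_build_finger_table; infer_instance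

-- ===== CLAIM (what is proved, stated in full; the proofs are below) =====
def Claim_equal_build_finger_table : Prop := ∀ (node_id : Int) (nodes : List Int) (m : Int), Dom_build_finger_table node_id nodes m → Pre_build_finger_table node_id nodes m → Spec_build_finger_table node_id nodes m (build_finger_table node_id nodes m)

-- ===== LEMMAS AND PROOFS =====

-- A's inner loop is 'first match, else the initial best', once s < e makes in_range an interval test
theorem fingerScan_eq_find? (s e ring : Int) (hse : s < e) (xs : List Int) (best : Int) :
    fingerScan s e ring xs best
      = ((xs.find? (fun v => decide (s < v) && decide (v ≤ e))).getD best) := by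
  induction xs with
  | nil => rfl
  | cons n rest ih =>
    simp only [fingerScan, in_range, if_pos hse, List.find?]
    by_cases h : (decide (s < n) && decide (n ≤ e)) = true
    · simp [h, gt_iff_lt]
    · simp only [gt_iff_lt, h, ih]
      simp only [Bool.not_eq_true] at h
      simp [h]

-- boundary specification of Source B's binary-search loop
theorem bsB_spec (vals : List Int) (strict : Bool) (x : Int)
    (hs : vals.Pairwise (· ≤ ·)) :
    ∀ (lo hi : Nat), hi ≤ vals.length → lo ≤ hi →
    (∀ j, j < lo → ∀ (hj : j < vals.length), (if strict then vals[j] < x else vals[j] ≤ x)) →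
    (∀ j, hi ≤ j → ∀ (hj : j < vals.length), ¬(if strict then vals[j] < x else vals[j] ≤ x)) →
    lo ≤ bsB vals strict x lo hi ∧ bsB vals strict x lo hi ≤ hi ∧
    (∀ j, j < bsB vals strict x lo hi → ∀ (hj : j < vals.length), (if strict then vals[j] < x else vals[j] ≤ x)) ∧
    (∀ j, bsB vals strict x lo hi ≤ j → ∀ (hj : j < vals.length), ¬(if strict then vals[j] < x else vals[j] ≤ x)) := by
  intro lo hi
  induction lo, hi using bsB.induct vals strict x with
  | case1 lo hi h mid hcond ih =>
    intro hhi hlohi hbelow habove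
    have hmidval : mid = (lo + hi) / 2 := rfl
    have hmidlt : mid < vals.length := by omega
    have hmidv : PySem.List.pyGetD vals ((mid : Nat) : Int) 0 = vals[mid] := by
      rw [PySem.List.pyGetD_natCast, List.getD_eq_getElem _ _ hmidlt]
    have hcondv := hcond
    rw [hmidv] at hcondv
    have hcond' : (if strict then vals[mid] < x else vals[mid] ≤ x) := by
      cases strict <;> simpa using hcondv
    have hget := List.pairwise_iff_getElem.mp hs
    have hbelow' : ∀ j, j < mid + 1 → ∀ (hj : j < vals.length),
        (if strict then vals[j] < x else vals[j] ≤ x) := by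
      intro j hj hjlt
      rcases Nat.lt_or_ge j mid with hlt | hge
      · have hle : vals[j] ≤ vals[mid] := hget j mid hjlt hmidlt hlt
        cases strict <;> simp only [if_true, if_false, Bool.false_eq_true] at hcond' ⊢ <;> omega
      · have : j = mid := by omega
        subst this; exact hcond'
    obtain ⟨r1, r2, r3, r4⟩ := ih hhi (by omega) hbelow' habove
    have hstep : bsB vals strict x lo hi = bsB vals strict x (mid + 1) hi := by
      rw [bsB]
      simp only [dif_pos h]
      rw [show ((lo + hi) / 2 : Nat) = mid from rfl]
      have hcond2 : (if strict = true then decide (PySem.List.pyGetD vals ((mid : Nat) : Int) 0 < x)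
          else decide (PySem.List.pyGetD vals ((mid : Nat) : Int) 0 ≤ x)) = true := hcond
      rw [if_pos hcond2]
    rw [hstep]
    exact ⟨by omega, r2, r3, r4⟩
  | case2 lo hi h mid hcond ih =>
    intro hhi hlohi hbelow habove
    have hmidval : mid = (lo + hi) / 2 := rfl
    have hmidlt : mid < vals.length := by omega
    have hmidv : PySem.List.pyGetD vals ((mid : Nat) : Int) 0 = vals[mid] := by
      rw [PySem.List.pyGetD_natCast, List.getD_eq_getElem _ _ hmidlt]
    have hcondv := hcond
    rw [hmidv] at hcondv
    have hcond' : ¬(if strict then vals[mid] < x else vals[mid] ≤ x) := by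
      cases strict <;> simpa using hcondv
    have hget := List.pairwise_iff_getElem.mp hs
    have habove' : ∀ j, mid ≤ j → ∀ (hj : j < vals.length),
        ¬(if strict then vals[j] < x else vals[j] ≤ x) := by
      intro j hj hjlt
      have hle : vals[mid] ≤ vals[j] := by
        rcases Nat.lt_or_ge mid j with hlt | hge
        · exact hget mid j hmidlt hjlt hlt
        · have : mid = j := by omega
          subst this; exact le_refl _
      cases strict <;> simp only [if_true, if_false, Bool.false_eq_true] at hcond' ⊢ <;> omega
    obtain ⟨r1, r2, r3, r4⟩ := ih (by omega) (by omega) hbelow habove'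
    have hstep : bsB vals strict x lo hi = bsB vals strict x lo mid := by
      rw [bsB]
      simp only [dif_pos h]
      rw [show ((lo + hi) / 2 : Nat) = mid from rfl]
      have hcond2 : ¬((if strict = true then decide (PySem.List.pyGetD vals ((mid : Nat) : Int) 0 < x)
          else decide (PySem.List.pyGetD vals ((mid : Nat) : Int) 0 ≤ x)) = true) := hcond
      rw [if_neg hcond2]
    rw [hstep]
    exact ⟨r1, by omega, r3, r4⟩
  | case3 lo hi h =>
    intro hhi hlohi hbelow habove
    rw [bsB]
    simp only [dif_neg h]
    exact ⟨le_refl _, by omega, hbelow, fun j hj => habove j (by omega)⟩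

-- the per-finger computation of B equals A's first-match scan
theorem query_eq (nodes : List Int) (lo hi : Int) :
    (let pairs := PySem.List.sorted ((PySem.List.enumerate nodes).map (fun p => (p.2, p.1))) (fun p => p.1) false
     let vals := pairs.map (fun p => p.1)
     let idxs := pairs.map (fun p => p.2)
     let n := vals.length
     let a := bsB vals true lo 0 n
     let b := bsB vals false hi 0 n
     if a < b then
        PySem.List.pyGetD nodes ((PySem.List.min? (PySem.List.slice idxs (some (a : Int)) (some (b : Int))) (fun z => z)).getD 0) 0
     else PySem.List.pyGetD nodes 0 0)
    = ((nodes.find? (fun v => decide (lo ≤ v) && decide (v ≤ hi))).getD (PySem.List.pyGetD nodes 0 0)) := by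
  simp only
  set ep := (PySem.List.enumerate nodes).map (fun p : Int × Int => (p.2, p.1)) with hep
  set pairs := PySem.List.sorted ep (fun p => p.1) false with hpairs
  set vals := pairs.map (fun p => p.1) with hvals
  set idxs := pairs.map (fun p => p.2) with hidxs
  set a := bsB vals true lo 0 vals.length with ha
  set b := bsB vals false hi 0 vals.length with hb
  set pred := (fun v : Int => decide (lo ≤ v) && decide (v ≤ hi)) with hpred
  have hperm : pairs.Perm ep := PySem.List.sorted_perm ep (fun p => p.1) false
  have hplen : pairs.length = nodes.length := by
    rw [hperm.length_eq, hep, List.length_map, PySem.List.length_enumerate]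
  have hvlen : vals.length = pairs.length := by rw [hvals, List.length_map]
  have hilen : idxs.length = pairs.length := by rw [hidxs, List.length_map]
  have hsorted : vals.Pairwise (· ≤ ·) := by
    rw [hvals]
    exact List.pairwise_map.mpr (PySem.List.sorted_pairwise ep (fun p => p.1))
  have hentry : ∀ j, ∀ (hj : j < pairs.length), ∃ k, ∃ (hk : k < nodes.length),
      pairs[j] = ((nodes[k] : Int), (k : Int)) := by
    intro j hj
    have hmem : pairs[j] ∈ ep := hperm.mem_iff.mp (List.getElem_mem hj)
    rw [hep] at hmem
    obtain ⟨q, hq, hqe⟩ := List.mem_map.mp hmem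
    obtain ⟨k, hk, hqk⟩ := (PySem.List.mem_enumerate_iff nodes 0 q).mp hq
    refine ⟨k, hk, ?_⟩
    rw [← hqe, hqk]
    simp
  have hmemp : ∀ k, ∀ (hk : k < nodes.length), ((nodes[k] : Int), (k : Int)) ∈ pairs := by
    intro k hk
    rw [hperm.mem_iff, hep]
    refine List.mem_map.mpr ⟨((k : Int), nodes[k]), ?_, rfl⟩
    exact (PySem.List.mem_enumerate_iff nodes 0 _).mpr ⟨k, hk, by simp⟩
  have hvalsget : ∀ j, ∀ (hj : j < pairs.length), vals[j]'(by omega) = (pairs[j]).1 := by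
    intro j hj
    simp [hvals, List.getElem_map]
  have hidxsget : ∀ j, ∀ (hj : j < pairs.length), idxs[j]'(by omega) = (pairs[j]).2 := by
    intro j hj
    simp [hidxs, List.getElem_map]
  -- binary-search boundary facts
  obtain ⟨_, hale, haL, haR⟩ := bsB_spec vals true lo hsorted 0 vals.length (le_refl _)
    (Nat.zero_le _) (by intro j hj _; exact absurd hj (Nat.not_lt_zero j))
    (by intro j hj hjlt; exact absurd hjlt (by omega))
  obtain ⟨_, hble, hbL, hbR⟩ := bsB_spec vals false hi hsorted 0 vals.length (le_refl _)
    (Nat.zero_le _) (by intro j hj _; exact absurd hj (Nat.not_lt_zero j))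
    (by intro j hj hjlt; exact absurd hjlt (by omega))
  rw [← ha] at hale haL haR
  rw [← hb] at hble hbL hbR
  have hA2 : ∀ j, j < a → ∀ (hj : j < vals.length), vals[j] < lo := by
    intro j h1 h2; simpa using haL j h1 h2
  have hA3 : ∀ j, a ≤ j → ∀ (hj : j < vals.length), lo ≤ vals[j] := by
    intro j h1 h2
    have := haR j h1 h2
    simp at this
    omega
  have hB2 : ∀ j, j < b → ∀ (hj : j < vals.length), vals[j] ≤ hi := by
    intro j h1 h2; simpa using hbL j h1 h2
  have hB3 : ∀ j, b ≤ j → ∀ (hj : j < vals.length), hi < vals[j] := by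
    intro j h1 h2
    have := hbR j h1 h2
    simp at this
    omega
  -- every position of the window [a, b) carries a matching index, and vice versa
  cases hres : nodes.find? pred with
  | none =>
    have hnone := List.find?_eq_none.mp hres
    have hab : ¬ (a < b) := by
      intro hlt
      have hjlt : a < vals.length := by omega
      obtain ⟨k, hk, hke⟩ := hentry a (by omega)
      have h1 : lo ≤ vals[a] := hA3 a (le_refl _) hjlt
      have h2 : vals[a] ≤ hi := hB2 a hlt hjlt
      have hva : vals[a] = nodes[k] := by rw [hvalsget a (by omega), hke]
      have : ¬ pred nodes[k] = true := hnone nodes[k] (List.getElem_mem hk)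
      rw [hpred] at this
      simp only [Bool.and_eq_true, decide_eq_true_eq] at this
      exact this ⟨by omega, by omega⟩
    rw [if_neg hab]
    rfl
  | some v0 =>
    obtain ⟨hpv0, k0, hk0, hv0, hmin⟩ := List.find?_eq_some_iff_getElem.mp hres
    rw [hpred] at hpv0
    simp only [Bool.and_eq_true, decide_eq_true_eq] at hpv0
    obtain ⟨j0, hj0, hj0e⟩ := List.mem_iff_getElem.mp (hmemp k0 hk0)
    have hj0p : j0 < pairs.length := hj0
    have hvj0 : vals[j0]'(by omega) = nodes[k0] := by rw [hvalsget j0 hj0p, hj0e]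
    have hij0 : idxs[j0]'(by omega) = (k0 : Int) := by rw [hidxsget j0 hj0p, hj0e]
    have haj0 : a ≤ j0 := by
      by_contra hcon
      have := hA2 j0 (by omega) (by omega)
      rw [hvj0, hv0] at this
      omega
    have hj0b : j0 < b := by
      by_contra hcon
      have := hB3 j0 (by omega) (by omega)
      rw [hvj0, hv0] at this
      omega
    have hab : a < b := by omega
    rw [if_pos hab]
    have hslice : PySem.List.slice idxs (some (a : Int)) (some (b : Int))
        = (idxs.drop a).take (b - a) := PySem.List.slice_natCast idxs a b
    -- k0 is in the window
    have hlen2 : j0 - a < ((idxs.drop a).take (b - a)).length := by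
      rw [List.length_take, List.length_drop]
      omega
    have hk0mem : (k0 : Int) ∈ (idxs.drop a).take (b - a) := by
      have hget : ((idxs.drop a).take (b - a))[j0 - a]'hlen2 = (k0 : Int) := by
        rw [List.getElem_take, List.getElem_drop, ← hij0]
        congr 1
        omega
      rw [← hget]
      exact List.getElem_mem hlen2
    -- every window element is a matching index, hence at least k0
    have hmin' : ∀ y ∈ (idxs.drop a).take (b - a), (k0 : Int) ≤ y := by
      intro y hy
      obtain ⟨iw, hiw, hiwe⟩ := List.mem_take_iff_getElem.mp hy
      rw [List.getElem_drop] at hiwe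
      simp only [List.length_drop] at hiw
      have hjlen : a + iw < pairs.length := by omega
      obtain ⟨k, hk, hke⟩ := hentry (a + iw) hjlen
      have hvk : vals[a + iw]'(by omega) = nodes[k] := by rw [hvalsget (a + iw) hjlen, hke]
      have hik : idxs[a + iw]'(by omega) = (k : Int) := by rw [hidxsget (a + iw) hjlen, hke]
      have h1 : lo ≤ nodes[k] := by
        rw [← hvk]
        exact hA3 (a + iw) (by omega) (by omega)
      have h2 : nodes[k] ≤ hi := by
        rw [← hvk]
        exact hB2 (a + iw) (by omega) (by omega)
      have hk0k : k0 ≤ k := by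
        by_contra hcon
        have := hmin k (by omega)
        rw [hpred] at this
        simp only [Bool.not_and, Bool.or_eq_true, Bool.not_eq_true', decide_eq_false_iff_not] at this
        rcases this with h | h <;> omega
      rw [← hiwe, hik]
      exact_mod_cast hk0k
    -- the minimum of the window is exactly k0
    have hminS : PySem.List.min? ((idxs.drop a).take (b - a)) (fun z => z) = some ((k0 : Nat) : Int) := by
      cases hm : PySem.List.min? ((idxs.drop a).take (b - a)) (fun z => z) with
      | none =>
        rw [PySem.List.min?_eq_none_iff] at hm
        rw [hm] at hk0mem
        exact absurd hk0mem (List.not_mem_nil)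
      | some w =>
        have hw1 : w ∈ (idxs.drop a).take (b - a) := PySem.List.min?_mem hm
        have hw2 : w ≤ (k0 : Int) := PySem.List.min?_isMin hm _ hk0mem
        have hw3 : (k0 : Int) ≤ w := hmin' w hw1
        rw [le_antisymm hw2 hw3]
    rw [hslice, hminS]
    simp only [Option.getD_some]
    rw [PySem.List.pyGetD_natCast, List.getD_eq_getElem _ _ hk0, hv0]
-- one finger: A's scan equals B's binary-search + min-index pick
theorem element_eq (nodes : List Int) (ring start half : Int)
    (hhalf : 0 ≤ half) :
    fingerScan (start - 1) (start + half) ring nodes (PySem.List.pyGetD nodes 0 0)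
    = (let pairs := PySem.List.sorted ((PySem.List.enumerate nodes).map (fun p => (p.2, p.1))) (fun p => p.1) false
       let vals := pairs.map (fun p => p.1)
       let idxs := pairs.map (fun p => p.2)
       let n := vals.length
       let a := bsB vals true start 0 n
       let b := bsB vals false (start + half) 0 n
       if a < b then
          PySem.List.pyGetD nodes ((PySem.List.min? (PySem.List.slice idxs (some (a : Int)) (some (b : Int))) (fun z => z)).getD 0) 0
       else PySem.List.pyGetD nodes 0 0) := by
  have h1 := fingerScan_eq_find? (start - 1) (start + half) ring (by omega) nodes (PySem.List.pyGetD nodes 0 0)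
  have h2 := query_eq nodes start (start + half)
  simp only at h1 h2 ⊢
  rw [h1, h2]
  have hpred : (fun v : Int => decide (start - 1 < v) && decide (v ≤ start + half))
      = (fun v : Int => decide (start ≤ v) && decide (v ≤ start + half)) := by
    funext v
    congr 1
    exact decide_eq_decide.mpr (by omega)
  rw [hpred]

-- ===== VERDICT (by name: the statement is the Claim_ definition above) =====
theorem build_finger_table_spec : Claim_equal_build_finger_table := by
  intro node_id nodes m _hdom _hpre
  unfold Spec_build_finger_table build_finger_table build_finger_table_alt
  simp only [PySem.List.foldl_append_singleton_eq_map, List.nil_append]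
  apply List.map_congr_left
  intro i _hi
  have hhalf : (0:Int) ≤ PySem.Int.floordiv ((1 : Int) <<< m.toNat) 2 := by
    rw [PySem.Int.floordiv_eq_ediv_of_pos (by norm_num)]
    exact Int.ediv_nonneg (by rw [Int.shiftLeft_eq]; positivity) (by norm_num)
  exact element_eq nodes _ _ _ hhalf
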